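-- pv_equiv track=rewrite | github.com/Mateo-VL/Hangman | Trabajo Hangman. Segundo prototipo.py | letra_mas_comun
-- ===== SOURCE A (Python) =====
-- from typing import List, Tuple
--
-- def letra_mas_comun(diccionario_filtrado : List, abc : List, usadas : str)-> Tuple:
--     '''
--     Dentro de las palabras que hay en diccionario_filtrado, se fija cuál es la letra que más veces se repite. Agrega letra a string que muestra las letras usadas hasta el momento.
--
--     Parameters
--     ----------
--     diccionario_filtrado : List
--         Contiene todas las palabras validas para jugar ya filtradas por largo y por posición de las letras
--     abc : List
--         Es una lista con todas las letras del abecedario que aun no fueron usadas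
--     usadas : str
--         Son las letras que ya fueron usadas por el usuario
--
--     Returns
--     -------
--     Tuple
--         Es una tupla que contiene a la letra que mas veces aparece en el diccionario filtrado, el abecedario sin las letras usadas y las letras usadas
--
--     '''
--     coincidencias = []
--     for numero in range(len(abc)):
--         coincidencias.append(0)
--     for palabra in diccionario_filtrado:
--         for letra in palabra:
--             if letra in abc:
--                 coincidencia = abc.index(letra)
--                 coincidencias[coincidencia] += 1
--     letra_posible = abc[coincidencias.index(max(coincidencias))]
--     usadas += letra_posible
--     abc.pop(abc.index(letra_posible))
--     return letra_posible, abc, usadas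
-- ===== SOURCE B (Python) =====
-- from typing import List, Tuple
--
-- def letra_mas_comun(diccionario_filtrado : List, abc : List, usadas : str) -> Tuple:
--     # No count table at all: flatten the dictionary into one list of letters, then
--     # pick the letter directly by a key-based max over abc whose key recounts that
--     # letter's occurrences (letter-major traversal with list.count).
--     # Python's max returns the FIRST maximal element of abc, matching A's
--     # coincidencias.index(max) tie-break; max([]) raises ValueError like A's max.
--     letras = list("".join(diccionario_filtrado))
--     letra_posible = max(abc, key=letras.count)
--     usadas += letra_posible
--     abc.remove(letra_posible)
--     return letra_posible, abc, usadas
-- ===== Notes on version B (the rewrite author's own statement) =====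
-- stated objective: simpler
-- what changed: Drops A's index-aligned parallel count list entirely: instead of a word-major pass building counts (with an in-abc test and abc.index scan per character) followed by max/index/pop, B flattens the dictionary into one letter list and selects the letter directly with a key-based max over abc whose key recounts via list.count (letter-major traversal), then abc.remove.
import Mathlib
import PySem

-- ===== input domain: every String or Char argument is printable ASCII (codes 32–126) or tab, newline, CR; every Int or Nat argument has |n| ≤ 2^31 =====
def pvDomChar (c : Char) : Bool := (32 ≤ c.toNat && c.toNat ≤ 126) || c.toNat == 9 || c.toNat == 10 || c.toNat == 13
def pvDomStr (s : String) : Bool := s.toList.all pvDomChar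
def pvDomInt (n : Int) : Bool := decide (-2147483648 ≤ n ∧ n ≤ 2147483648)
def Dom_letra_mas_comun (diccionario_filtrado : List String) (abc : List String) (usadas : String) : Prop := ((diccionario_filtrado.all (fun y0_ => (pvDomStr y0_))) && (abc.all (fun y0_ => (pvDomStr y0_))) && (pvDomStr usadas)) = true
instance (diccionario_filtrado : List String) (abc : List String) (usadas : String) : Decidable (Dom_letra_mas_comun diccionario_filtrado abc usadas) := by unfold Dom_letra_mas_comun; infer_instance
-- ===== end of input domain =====

-- B drops A's parallel count list: a key-based max over abc recounts each letter's
-- occurrences on the fly (letter-major traversal) — simpler, same asymptotic cost.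
-- Note: A and B both mutate the caller's abc in Python; the equivalence proved here
-- is about the return value only.


-- ===== PORT A =====
def letra_mas_comun (diccionario_filtrado : List String) (abc : List String) (usadas : String) : String × List String × String :=
  -- coincidencias = []; for numero in range(len(abc)): coincidencias.append(0)
  let coinc0 : List Int := (PySem.List.pyRange 0 (abc.length : Int)).foldl (fun a _ => a ++ [(0 : Int)]) []
  -- for palabra in …: for letra in palabra: if letra in abc: coincidencias[abc.index(letra)] += 1
  let coinc : List Int := diccionario_filtrado.foldl (fun acc p =>
    p.toList.foldl (fun acc c =>
      let letra := String.mk [c]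
      if letra ∈ abc then
        match PySem.List.index? abc letra with
        | some i => acc.set i (acc.getD i 0 + 1)
        | none => acc
      else acc) acc) coinc0
  -- letra_posible = abc[coincidencias.index(max(coincidencias))]  (max([]) raises: Pre_)
  match PySem.List.max? coinc (fun x => x) with
  | none => ("", abc, usadas)
  | some m =>
    match PySem.List.index? coinc m with
    | none => ("", abc, usadas)
    | some k =>
      let letra_posible := abc.getD k ""
      let usadas' := usadas ++ letra_posible
      -- abc.pop(abc.index(letra_posible))
      match PySem.List.index? abc letra_posible with
      | none => (letra_posible, abc, usadas')
      | some j =>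
        match PySem.List.pop? abc (j : Int) with
        | none => (letra_posible, abc, usadas')
        | some (_, abc') => (letra_posible, abc', usadas')

-- ===== PORT B =====
def letra_mas_comun_alt (diccionario_filtrado : List String) (abc : List String) (usadas : String) : String × List String × String :=
  -- letras = list("".join(diccionario_filtrado))
  let letras : List String := (PySem.Str.join "" diccionario_filtrado).toList.map (fun c => String.mk [c])
  -- letra_posible = max(abc, key=letras.count)  (max([]) raises: Pre_)
  match PySem.List.max? abc (fun l => (PySem.List.count letras l : Int)) with
  | none => ("", abc, usadas)
  | some letra_posible =>
    -- abc.remove(letra_posible) never raises here (letra_posible ∈ abc)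
    match PySem.List.remove? abc letra_posible with
    | none => (letra_posible, abc, usadas ++ letra_posible)
    | some abc' => (letra_posible, abc', usadas ++ letra_posible)

-- ===== PRECONDITION & SPEC =====
-- A raises ValueError (max of an empty sequence) exactly when abc is empty.
def Pre_letra_mas_comun (diccionario_filtrado : List String) (abc : List String) (usadas : String) : Prop := abc ≠ []
instance (diccionario_filtrado : List String) (abc : List String) (usadas : String) : Decidable (Pre_letra_mas_comun diccionario_filtrado abc usadas) := by unfold Pre_letra_mas_comun; infer_instance
def pvWitness_letra_mas_comun : List String × List String × String := (["casa", "cosa"], ["a", "b", "c"], "xy")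

def Spec_letra_mas_comun (diccionario_filtrado : List String) (abc : List String) (usadas : String) (out : String × List String × String) : Prop := out = letra_mas_comun_alt diccionario_filtrado abc usadas
instance (diccionario_filtrado : List String) (abc : List String) (usadas : String) (out : String × List String × String) : Decidable (Spec_letra_mas_comun diccionario_filtrado abc usadas out) := by unfold Spec_letra_mas_comun; infer_instance

-- ===== CLAIM (what is proved, stated in full; the proofs are below) =====
def Claim_equal_letra_mas_comun : Prop := ∀ (diccionario_filtrado : List String) (abc : List String) (usadas : String), Dom_letra_mas_comun diccionario_filtrado abc usadas → Pre_letra_mas_comun diccionario_filtrado abc usadas → Spec_letra_mas_comun diccionario_filtrado abc usadas (letra_mas_comun diccionario_filtrado abc usadas)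

-- ===== LEMMAS AND PROOFS =====

-- the stream of all characters of all words, as one-character strings
def pvChars (diccionario_filtrado : List String) : List String :=
  diccionario_filtrado.flatMap (fun p => p.toList.map (fun c => String.mk [c]))

-- A's counting step over that stream
def pvStepA (abc : List String) (acc : List Int) (letra : String) : List Int :=
  if letra ∈ abc then
    match PySem.List.index? abc letra with
    | some i => acc.set i (acc.getD i 0 + 1)
    | none => acc
  else acc

theorem pvCoinc_eq_foldl (diccionario_filtrado : List String) (abc : List String) (init : List Int) :
    diccionario_filtrado.foldl (fun acc p =>
      p.toList.foldl (fun acc c =>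
        let letra := String.mk [c]
        if letra ∈ abc then
          match PySem.List.index? abc letra with
          | some i => acc.set i (acc.getD i 0 + 1)
          | none => acc
        else acc) acc) init
    = (pvChars diccionario_filtrado).foldl (pvStepA abc) init := by
  conv_rhs => rw [pvChars, List.foldl_flatMap]
  simp only [List.foldl_map]
  rfl

theorem pvJoin_nil_flatten (L : List (List Char)) : PySem.Chars.join [] L = L.flatten := by
  induction L with
  | nil => simp [PySem.Chars.join_nil]
  | cons x t ih =>
    cases t with
    | nil => simp [PySem.Chars.join_singleton]
    | cons y t' =>
      rw [PySem.Chars.join_cons_cons, ih]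
      simp

-- B's letras list is exactly the character stream pvChars
theorem pvLetras_eq (diccionario_filtrado : List String) :
    (PySem.Str.join "" diccionario_filtrado).toList.map (fun c => String.mk [c])
      = pvChars diccionario_filtrado := by
  rw [PySem.Str.toList_join]
  rw [show ("" : String).toList = ([] : List Char) from rfl]
  rw [pvJoin_nil_flatten, List.map_flatten, pvChars, List.flatMap_def, List.map_map]
  rfl

theorem pvStepA_length (abc : List String) (L : List String) (acc : List Int) :
    (L.foldl (pvStepA abc) acc).length = acc.length := by
  induction L generalizing acc with
  | nil => rfl
  | cons x t ih =>
    rw [List.foldl_cons, ih]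
    unfold pvStepA
    split
    · split <;> simp
    · rfl

theorem pvStepA_getD (abc : List String) (L : List String) (acc : List Int) (i : Nat)
    (hlen : abc.length ≤ acc.length) :
    (L.foldl (pvStepA abc) acc).getD i 0
      = acc.getD i 0 + (L.countP (fun s => PySem.List.index? abc s == some i) : Int) := by
  induction L generalizing acc with
  | nil => simp
  | cons x t ih =>
    have hstep : (pvStepA abc acc x).getD i 0
        = acc.getD i 0 + (if PySem.List.index? abc x == some i then (1:Int) else 0) := by
      unfold pvStepA
      by_cases hm : x ∈ abc
      · simp only [hm, if_true]
        obtain ⟨k, hk⟩ := Option.isSome_iff_exists.mp ((PySem.List.index?_isSome_iff abc x).mpr hm)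
        rw [hk]
        obtain ⟨hklt, hxk, _⟩ := PySem.List.getElem_of_index?_eq_some hk
        have hka : k < acc.length := lt_of_lt_of_le hklt hlen
        by_cases hik : k = i
        · subst hik
          simp [List.getD, hka]
        · have : (some k == some i) = false := by simp [hik]
          simp [this, List.getD, List.getElem?_set_ne hik]
      · have hnone : PySem.List.index? abc x = none := by
          rw [← Option.not_isSome_iff_eq_none]
          simp [hm]
        rw [PySem.List.index?_eq_idxOf?] at hnone
        simp [hm, hnone]
    have hlen' : abc.length ≤ (pvStepA abc acc x).length := by
      unfold pvStepA
      split
      · split <;> simp [hlen]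
      · exact hlen
    rw [List.foldl_cons, ih _ hlen', hstep, List.countP_cons]
    push_cast
    split <;> ring

theorem pvExists_first_argmax (f : Nat → Int) (n : Nat) (hn : 0 < n) :
    ∃ k, k < n ∧ (∀ j, j < n → f j ≤ f k) ∧ (∀ j, j < k → f j < f k) := by
  induction n with
  | zero => omega
  | succ m ih =>
    rcases Nat.eq_zero_or_pos m with hm | hm
    · refine ⟨0, by omega, ?_, by omega⟩
      intro j hj
      have : j = 0 := by omega
      simp [this]
    · obtain ⟨k, hk, hle, hlt⟩ := ih hm
      by_cases h : f k < f m
      · refine ⟨m, by omega, ?_, ?_⟩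
        · intro j hj
          rcases Nat.lt_succ_iff_lt_or_eq.mp hj with h1 | h1
          · exact le_of_lt (lt_of_le_of_lt (hle j h1) h)
          · simp [h1]
        · intro j hj
          exact lt_of_le_of_lt (hle j hj) h
      · refine ⟨k, by omega, ?_, hlt⟩
        intro j hj
        rcases Nat.lt_succ_iff_lt_or_eq.mp hj with h1 | h1
        · exact hle j h1
        · subst h1; omega

theorem pvFoldl_max_first {α : Type} (key : α → Int) (t : List α) :
    ∀ (x : α) (k : Nat) (hk : k < (x :: t).length),
    (∀ j (hj : j < (x :: t).length), key (x :: t)[j] ≤ key (x :: t)[k]) →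
    (∀ j (hj : j < k), key (x :: t)[j] < key (x :: t)[k]) →
    t.foldl (fun m y => if key m < key y then y else m) x = (x :: t)[k] := by
  induction t with
  | nil =>
    intro x k hk _ _
    match k, hk with
    | 0, _ => simp
  | cons y t' ih =>
    intro x k hk hle hlt
    rw [List.foldl_cons]
    match k, hk with
    | 0, _ =>
      have hy : ¬ key x < key y := not_lt.mpr (by simpa using hle 1 (by simp))
      rw [if_neg hy]
      exact ih x 0 (by simp) (fun j hj => by
        match j, hj with
        | 0, _ => simp
        | j+1, hj => simpa using hle (j+2) (by simpa using hj)) (by omega)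
    | 1, _ =>
      have hy : key x < key y := by simpa using hlt 0 (by omega)
      rw [if_pos hy]
      exact ih y 0 (by simp) (fun j hj => by
        match j, hj with
        | 0, _ => simp
        | j+1, hj => simpa using hle (j+2) (by simpa using hj)) (by omega)
    | k+2, hk =>
      have hkt : k < t'.length := by simpa using hk
      have h0 : key x < key (t'[k]'hkt) := by simpa using hlt 0 (by omega)
      have h1 : key y < key (t'[k]'hkt) := by simpa using hlt 1 (by omega)
      by_cases hxy : key x < key y
      · rw [if_pos hxy]
        have := ih y (k+1) (by simpa using hk) (fun j hj => by
          match j, hj with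
          | 0, _ => exact le_of_lt h1
          | j+1, hj => simpa using hle (j+2) (by simpa using hj)) (fun j hj => by
          match j, hj with
          | 0, _ => exact h1
          | j+1, hj => simpa using hlt (j+2) (by simpa using hj))
        simpa using this
      · rw [if_neg hxy]
        have := ih x (k+1) (by simpa using hk) (fun j hj => by
          match j, hj with
          | 0, _ => exact le_of_lt h0
          | j+1, hj => simpa using hle (j+2) (by simpa using hj)) (fun j hj => by
          match j, hj with
          | 0, _ => exact h0
          | j+1, hj => simpa using hlt (j+2) (by simpa using hj))
        simpa using this

theorem pvMax?_some {α : Type} (key : α → Int) (t : List α) :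
    ∀ (x : α), PySem.List.max? (x :: t) key
      = some (t.foldl (fun m y => if key m < key y then y else m) x) := by
  induction t with
  | nil => intro x; rfl
  | cons y t' ih =>
    intro x
    show PySem.List.max? (x :: y :: t') key = _
    simp only [PySem.List.max?, List.foldl_cons] at *
    by_cases h : key x < key y <;> simp only [h, ite_true, ite_false] <;>
      [exact ih y; exact ih x]

theorem pvMax?_eq_getElem {α : Type} (xs : List α) (key : α → Int) (k : Nat)
    (hk : k < xs.length)
    (hle : ∀ j (hj : j < xs.length), key xs[j] ≤ key xs[k])
    (hlt : ∀ j (hj : j < k), key xs[j] < key xs[k]) :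
    PySem.List.max? xs key = some xs[k] := by
  match xs with
  | [] => simp at hk
  | x :: t =>
    rw [pvMax?_some, pvFoldl_max_first key t x k hk hle hlt]

theorem pvIndex?_of_first {α : Type} [BEq α] [LawfulBEq α] (xs : List α) (k : Nat)
    (hk : k < xs.length) (hne : ∀ j (hj : j < k), xs[j] ≠ xs[k]) :
    PySem.List.index? xs xs[k] = some k := by
  rw [PySem.List.index?_eq_some_iff]
  refine ⟨xs.take k, xs.drop (k+1), ?_, by simp [hk.le], ?_⟩
  · rw [List.getElem_cons_drop, List.take_append_drop]
  · intro hmem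
    obtain ⟨j, hj, hj2⟩ := List.mem_iff_getElem.mp hmem
    rw [List.length_take] at hj
    rw [List.getElem_take] at hj2
    exact hne j (by omega) hj2

theorem pvErase_eq_eraseIdx {α : Type} [BEq α] [LawfulBEq α] (l : List α) (a : α) (k : Nat)
    (hk : k < l.length) (h : l[k] = a) (hne : ∀ j (hj : j < k), l[j] ≠ a) :
    l.erase a = l.eraseIdx k := by
  induction l generalizing k with
  | nil => simp at hk
  | cons x t ih =>
    match k, hk with
    | 0, _ => simp at h; simp [h]
    | k+1, hk =>
      have hx : x ≠ a := by simpa using hne 0 (by omega)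
      rw [List.erase_cons_tail (by simpa using hx), List.eraseIdx_cons_succ,
        ih k (by simpa using hk) (by simpa using h) (fun j hj => by simpa using hne (j+1) (by omega))]

theorem pvCoinc0_eq (n : Nat) :
    ((PySem.List.pyRange 0 (n:Int)).foldl (fun a _ => a ++ [(0:Int)]) []) = List.replicate n 0 := by
  rw [PySem.List.foldl_append_singleton_eq_map (fun _ => (0:Int))]
  simp [PySem.List.pyRange_zero_natCast]
  exact List.eq_replicate_iff.mpr (by simp)

theorem pvCountP_char (abc : List String) (L : List String) (i : Nat) (hi : i < abc.length) :
    (L.countP (fun s => PySem.List.index? abc s == some i) : Int)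
      = if PySem.List.index? abc abc[i] = some i then (L.count abc[i] : Int) else 0 := by
  split
  case isTrue h =>
    have hfun : (fun s => PySem.List.index? abc s == some i) = (fun s => s == abc[i]) := by
      funext s
      by_cases hs : PySem.List.index? abc s = some i
      · obtain ⟨_, he, _⟩ := PySem.List.getElem_of_index?_eq_some hs
        rw [hs, ← he]
        simp
      · have hne : (s == abc[i]) = false := by
          rw [beq_eq_false_iff_ne]
          intro he
          exact hs (he ▸ h)
        rw [PySem.List.index?_eq_idxOf?] at hs
        simp [hs, hne]
    rw [hfun, ← List.count_eq_countP]
  case isFalse h =>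
    have hfun : ∀ s ∈ L, ¬ (fun s => PySem.List.index? abc s == some i) s = true := by
      intro s _ hs
      simp only [beq_iff_eq] at hs
      obtain ⟨_, he, _⟩ := PySem.List.getElem_of_index?_eq_some hs
      exact h (he ▸ hs)
    rw [List.countP_eq_zero.mpr hfun]
    rfl

-- ===== VERDICT (by name: the statement is the Claim_ definition above) =====
theorem letra_mas_comun_spec : Claim_equal_letra_mas_comun := by
  intro d abc us _ habc
  unfold Spec_letra_mas_comun letra_mas_comun letra_mas_comun_alt
  simp only [pvCoinc_eq_foldl, pvCoinc0_eq]
  have hn0 : 0 < abc.length := List.length_pos_iff.mpr habc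
  obtain ⟨q, hq, hle, hlt⟩ := pvExists_first_argmax
    (fun j => ((pvChars d).count (abc.getD j "") : Int)) abc.length hn0
  have habcq : abc.getD q "" = abc[q] := List.getD_eq_getElem abc "" hq
  rw [habcq] at hle hlt
  -- q is the first occurrence of its own letter in abc
  have hne_q : ∀ j (hj : j < q), abc[j] ≠ abc[q] := by
    intro j hj he
    have := hlt j hj
    rw [List.getD_eq_getElem abc "" (by omega), he] at this
    exact lt_irrefl _ this
  have hfirst : PySem.List.index? abc abc[q] = some q := pvIndex?_of_first abc q hq hne_q
  -- the coincidencias list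
  have hClen : ((pvChars d).foldl (pvStepA abc) (List.replicate abc.length 0)).length = abc.length := by
    rw [pvStepA_length]; simp
  have hCval : ∀ i (hi : i < abc.length),
      ((pvChars d).foldl (pvStepA abc) (List.replicate abc.length 0))[i]'(by omega)
        = if PySem.List.index? abc abc[i] = some i then ((pvChars d).count abc[i] : Int) else 0 := by
    intro i hi
    have h1 := pvStepA_getD abc (pvChars d) (List.replicate abc.length 0) i (by simp)
    rw [List.getD_eq_getElem _ 0 (by omega)] at h1
    rw [h1, pvCountP_char abc (pvChars d) i hi]
    simp
  have hCq : ((pvChars d).foldl (pvStepA abc) (List.replicate abc.length 0))[q]'(by omega)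
      = ((pvChars d).count abc[q] : Int) := by
    rw [hCval q hq, if_pos hfirst]
  have hCle_f : ∀ j (hj : j < abc.length),
      ((pvChars d).foldl (pvStepA abc) (List.replicate abc.length 0))[j]'(by omega)
        ≤ ((pvChars d).count abc[j] : Int) := by
    intro j hj
    rw [hCval j hj]
    split
    · exact le_refl _
    · positivity
  have hfle : ∀ j (hj : j < abc.length), ((pvChars d).count abc[j] : Int) ≤ ((pvChars d).count abc[q] : Int) := by
    intro j hj
    have := hle j hj
    rwa [List.getD_eq_getElem abc "" hj] at this
  have hflt : ∀ j (hj : j < q), ((pvChars d).count abc[j] : Int) < ((pvChars d).count abc[q] : Int) := by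
    intro j hj
    have := hlt j hj
    rwa [List.getD_eq_getElem abc "" (by omega)] at this
  have hmaxA : PySem.List.max? ((pvChars d).foldl (pvStepA abc) (List.replicate abc.length 0)) (fun x => x)
      = some (((pvChars d).foldl (pvStepA abc) (List.replicate abc.length 0))[q]'(by omega)) := by
    apply pvMax?_eq_getElem
    · intro j hj
      rw [hCq]
      exact le_trans (hCle_f j (by omega)) (hfle j (by omega))
    · intro j hj
      rw [hCq]
      exact lt_of_le_of_lt (hCle_f j (by omega)) (hflt j hj)
  have hidxA : PySem.List.index? ((pvChars d).foldl (pvStepA abc) (List.replicate abc.length 0))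
      (((pvChars d).foldl (pvStepA abc) (List.replicate abc.length 0))[q]'(by omega)) = some q := by
    apply pvIndex?_of_first
    intro j hj
    rw [hCq]
    exact ne_of_lt (lt_of_le_of_lt (hCle_f j (by omega)) (hflt j hj))
  -- B's key function is the character count
  have hkeyB : (fun l => (PySem.List.count ((PySem.Str.join "" d).toList.map (fun c => String.mk [c])) l : Int))
      = fun l => (((pvChars d).count l : Int)) := by
    funext l
    rw [PySem.List.count_eq, pvLetras_eq]
  have hmaxB : PySem.List.max? abc (fun l => ((pvChars d).count l : Int)) = some (abc[q]'hq) := by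
    apply pvMax?_eq_getElem
    · exact hfle
    · exact hflt
  have hremB : PySem.List.remove? abc (abc[q]'hq) = some (abc.erase (abc[q]'hq)) :=
    PySem.List.remove?_eq_some_erase abc _ (List.getElem_mem hq)
  have herase : abc.erase (abc[q]'hq) = abc.eraseIdx q :=
    pvErase_eq_eraseIdx abc _ q hq rfl hne_q
  have hpop : PySem.List.pop? abc ((q:Nat) : Int) = some (abc[q]'hq, abc.eraseIdx q) :=
    PySem.List.pop?_natCast abc q hq
  rw [hmaxA]
  dsimp only
  rw [hidxA]
  dsimp only
  rw [habcq, hfirst]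
  dsimp only
  rw [hpop]
  dsimp only
  rw [hkeyB, hmaxB]
  dsimp only
  rw [hremB]
  dsimp only
  rw [herase]
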